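-- pv_equiv track=rewrite | github.com/frawson10/CSC466-Lab02 | src/bakery.py | trimToSkyline
-- ===== SOURCE A (Python) =====
-- def trimToSkyline(items, k):
--     itemSetInQuestion = set()
--     itemSetPrevLevel = set()
--     toDelete = []
--     finalList = []
--     for item in items:
--         if(len(item) == k-1):
--             itemSetPrevLevel.add(frozenset(item))
--         elif(len(item) == k):
--             itemSetInQuestion.add(frozenset(item))
--     for item in itemSetInQuestion:
--         for prev in itemSetPrevLevel:
--             if(item.issuperset(prev)):
--                 toDelete.append(list(prev))
--     for item in items:
--         flag = True
--         for itemToDelete in toDelete: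
--             if(set(item) == set(itemToDelete)):
--                 flag = False
--         if flag:
--             finalList.append(list(item))
--     return finalList
-- ===== SOURCE B (Python) =====
-- def trimToSkyline(items, k):
--     prevSets = set()
--     questSets = set()
--     for item in items:
--         if len(item) == k - 1:
--             prevSets.add(frozenset(item))
--         elif len(item) == k:
--             questSets.add(frozenset(item))
--     # inverted index: element -> set of question-sets containing it
--     index = {}
--     for q in questSets:
--         for e in q:
--             index.setdefault(e, set()).add(q)
--     deleted = set()
--     for p in prevSets:
--         cands = questSets
--         for e in p:
--             cands = cands & index.get(e, set())
--         if cands: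
--             deleted.add(p)
--     return [list(item) for item in items if frozenset(item) not in deleted]
-- ===== Notes on version B (the rewrite author's own statement) =====
-- stated objective: alternative
-- what changed: Replaces A's nested question-set x prev-set subset scan and the per-item linear scan over the toDelete list with an inverted element-to-itemset index plus set intersection, and a single hash-set membership test per item.
import Mathlib
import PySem

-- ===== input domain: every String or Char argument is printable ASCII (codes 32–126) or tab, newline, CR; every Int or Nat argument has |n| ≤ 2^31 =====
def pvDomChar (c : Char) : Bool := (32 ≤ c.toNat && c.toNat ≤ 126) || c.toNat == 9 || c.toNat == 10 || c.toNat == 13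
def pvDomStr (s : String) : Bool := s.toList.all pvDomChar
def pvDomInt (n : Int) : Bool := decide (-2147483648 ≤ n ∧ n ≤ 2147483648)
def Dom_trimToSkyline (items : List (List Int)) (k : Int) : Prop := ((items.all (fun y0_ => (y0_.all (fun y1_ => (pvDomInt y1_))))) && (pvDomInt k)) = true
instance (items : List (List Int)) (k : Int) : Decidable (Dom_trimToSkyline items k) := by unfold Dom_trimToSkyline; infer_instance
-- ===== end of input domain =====

-- B replaces A's prev×question subset scan and the per-item linear scan over toDelete by an
-- inverted element→itemset index with set intersections and per-item hash-set membership.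
-- Python frozensets are modelled by their canonical strictly sorted element list (pvFz): the
-- output never depends on a set's iteration order, so this representation is exact.

-- ===== PORT A =====
/-- canonical value of Python's `frozenset(l)`. -/
def pvFz (l : List Int) : List Int :=
  PySem.List.sorted (PySem.Set.ofList l) (fun x => x) false

def trimToSkyline (items : List (List Int)) (k : Int) : List (List Int) :=
  let st := items.foldl
    (fun (st : PySem.Set (List Int) × PySem.Set (List Int)) item =>
      if (item.length : Int) = k - 1 then (PySem.Set.add st.1 (pvFz item), st.2)
      else if (item.length : Int) = k then (st.1, PySem.Set.add st.2 (pvFz item))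
      else st)
    ([], [])
  let itemSetPrevLevel := st.1
  let itemSetInQuestion := st.2
  let toDelete : List (List Int) :=
    itemSetInQuestion.foldl
      (fun acc q =>
        itemSetPrevLevel.foldl
          (fun acc2 p => if PySem.Set.issuperset q p then acc2 ++ [p] else acc2) acc)
      []
  items.foldl
    (fun fin item =>
      let flag := toDelete.foldl
        (fun f d => if PySem.Set.equal (PySem.Set.ofList item) (PySem.Set.ofList d) then false else f)
        true
      if flag then fin ++ [item] else fin)
    []

-- ===== PORT B =====
def trimToSkyline_alt (items : List (List Int)) (k : Int) : List (List Int) :=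
  let st := items.foldl
    (fun (st : PySem.Set (List Int) × PySem.Set (List Int)) item =>
      if (item.length : Int) = k - 1 then (PySem.Set.add st.1 (pvFz item), st.2)
      else if (item.length : Int) = k then (st.1, PySem.Set.add st.2 (pvFz item))
      else st)
    ([], [])
  let prevSets := st.1
  let questSets := st.2
  let index : PySem.Dict Int (PySem.Set (List Int)) :=
    questSets.foldl
      (fun d q =>
        q.foldl (fun d e => d.insert e (PySem.Set.add (d.getD e []) q)) d)
      PySem.Dict.empty
  let deleted : PySem.Set (List Int) :=
    prevSets.foldl
      (fun del p =>
        let cands := p.foldl (fun c e => PySem.Set.inter c (index.getD e [])) questSets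
        if cands.isEmpty then del else PySem.Set.add del p)
      []
  items.filter (fun item => !(PySem.Set.contains deleted (pvFz item)))

-- ===== PRECONDITION & SPEC =====
def Spec_trimToSkyline (items : List (List Int)) (k : Int) (out : List (List Int)) : Prop := out = trimToSkyline_alt items k
instance (items : List (List Int)) (k : Int) (out : List (List Int)) : Decidable (Spec_trimToSkyline items k out) := by unfold Spec_trimToSkyline; infer_instance

-- ===== CLAIM (what is proved, stated in full; the proofs are below) =====
def Claim_equal_trimToSkyline : Prop := ∀ (items : List (List Int)) (k : Int), Dom_trimToSkyline items k → Spec_trimToSkyline items k (trimToSkyline items k)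

-- ===== LEMMAS AND PROOFS =====

theorem mem_pvFz (x : Int) (l : List Int) : x ∈ pvFz l ↔ x ∈ l := by
  unfold pvFz
  rw [PySem.List.mem_sorted, PySem.Set.mem_ofList]

theorem pvFz_eq_of_ext (a b : List Int) (h : ∀ x, x ∈ a ↔ x ∈ b) : pvFz a = pvFz b := by
  have pa := PySem.List.sorted_ofList_pairwise_lt a
  have pb := PySem.List.sorted_ofList_pairwise_lt b
  have na : (pvFz a).Nodup := pa.imp (fun h => ne_of_lt h)
  have nb : (pvFz b).Nodup := pb.imp (fun h => ne_of_lt h)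
  have hperm : (pvFz a).Perm (pvFz b) := by
    rw [List.perm_ext_iff_of_nodup na nb]
    intro x; rw [mem_pvFz, mem_pvFz]; exact h x
  exact PySem.List.eq_of_perm_of_pairwise_le_of_injective (fun x => x) (fun _ _ h => h) hperm
    (pa.imp (fun h => le_of_lt h)) (pb.imp (fun h => le_of_lt h))

theorem pvFz_idem (l : List Int) : pvFz (pvFz l) = pvFz l :=
  pvFz_eq_of_ext _ _ (fun x => mem_pvFz x l)

theorem flag_foldl {α : Type} (c : α → Bool) (tds : List α) (b : Bool) :
    tds.foldl (fun f d => if c d then false else f) b = (b && !tds.any c) := by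
  induction tds generalizing b with
  | nil => simp
  | cons t ts ih =>
    simp only [List.foldl_cons, List.any_cons, ih]
    cases hc : c t <;> simp

theorem index_inner (qv : List Int) (es : List Int)
    (d : PySem.Dict Int (PySem.Set (List Int))) (e : Int) (q' : List Int) :
    q' ∈ (es.foldl (fun d e => d.insert e (PySem.Set.add (d.getD e []) qv)) d).getD e []
      ↔ q' ∈ d.getD e [] ∨ (e ∈ es ∧ q' = qv) := by
  induction es generalizing d with
  | nil => simp
  | cons a es ih =>
    simp only [List.foldl_cons, ih, PySem.Dict.getD_insert]
    by_cases he : e = a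
    · subst he
      simp [PySem.Set.mem_add]
      tauto
    · simp [he]

theorem index_mem (Q : List (List Int)) (d : PySem.Dict Int (PySem.Set (List Int)))
    (e : Int) (q' : List Int) :
    q' ∈ (Q.foldl (fun d q => q.foldl (fun d e => d.insert e (PySem.Set.add (d.getD e []) q)) d) d).getD e []
      ↔ q' ∈ d.getD e [] ∨ ∃ q ∈ Q, q' = q ∧ e ∈ q := by
  induction Q generalizing d with
  | nil => simp
  | cons a Q ih =>
    simp only [List.foldl_cons, ih, index_inner, List.mem_cons]
    constructor
    · rintro ((h | ⟨h1, h2⟩) | ⟨q, hq, h⟩)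
      · exact Or.inl h
      · exact Or.inr ⟨a, Or.inl rfl, h2, h1⟩
      · exact Or.inr ⟨q, Or.inr hq, h⟩
    · rintro (h | ⟨q, (rfl | hq), h1, h2⟩)
      · exact Or.inl (Or.inl h)
      · exact Or.inl (Or.inr ⟨h2, h1⟩)
      · exact Or.inr ⟨q, hq, h1, h2⟩

theorem cands_mem (idx : PySem.Dict Int (PySem.Set (List Int))) (p : List Int)
    (c : List (List Int)) (q : List Int) :
    q ∈ p.foldl (fun c e => PySem.Set.inter c (idx.getD e [])) c
      ↔ q ∈ c ∧ ∀ e ∈ p, q ∈ idx.getD e [] := by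
  induction p generalizing c with
  | nil => simp
  | cons a p ih =>
    simp only [List.foldl_cons, ih, PySem.Set.mem_inter, List.mem_cons]
    constructor
    · rintro ⟨⟨h1, h2⟩, h3⟩
      exact ⟨h1, fun e he => he.elim (fun h => h ▸ h2) (h3 e)⟩
    · rintro ⟨h1, h2⟩
      exact ⟨⟨h1, h2 a (Or.inl rfl)⟩, fun e he => h2 e (Or.inr he)⟩

theorem deleted_mem (idx : PySem.Dict Int (PySem.Set (List Int))) (Q : List (List Int))
    (P : List (List Int)) (del : PySem.Set (List Int)) (p' : List Int) :
    p' ∈ P.foldl (fun del p =>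
        if (p.foldl (fun c e => PySem.Set.inter c (idx.getD e [])) Q).isEmpty then del
        else PySem.Set.add del p) del
      ↔ p' ∈ del ∨ (p' ∈ P ∧ p'.foldl (fun c e => PySem.Set.inter c (idx.getD e [])) Q ≠ []) := by
  induction P generalizing del with
  | nil => simp
  | cons a P ih =>
    simp only [List.foldl_cons, ih, List.mem_cons]
    by_cases h : (a.foldl (fun c e => PySem.Set.inter c (idx.getD e [])) Q).isEmpty
    · simp only [if_pos h]
      constructor
      · rintro (h1 | h1)
        · exact Or.inl h1
        · exact Or.inr ⟨Or.inr h1.1, h1.2⟩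
      · rintro (h1 | ⟨(rfl | hm), hne⟩)
        · exact Or.inl h1
        · exact absurd (List.isEmpty_iff.mp h) hne
        · exact Or.inr ⟨hm, hne⟩
    · simp only [if_neg h, PySem.Set.mem_add]
      have hne : a.foldl (fun c e => PySem.Set.inter c (idx.getD e [])) Q ≠ [] := by
        intro hh; exact h (by simp [hh])
      constructor
      · rintro ((h1 | rfl) | h1)
        · exact Or.inl h1
        · exact Or.inr ⟨Or.inl rfl, hne⟩
        · exact Or.inr ⟨Or.inr h1.1, h1.2⟩
      · rintro (h1 | ⟨(rfl | hm), h2⟩)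
        · exact Or.inl (Or.inl h1)
        · exact Or.inl (Or.inr rfl)
        · exact Or.inr ⟨hm, h2⟩

theorem state_canonical (k : Int) (items : List (List Int))
    (st : PySem.Set (List Int) × PySem.Set (List Int))
    (h : ∀ x ∈ st.1, ∃ l, x = pvFz l) :
    ∀ x ∈ (items.foldl
      (fun (st : PySem.Set (List Int) × PySem.Set (List Int)) item =>
        if (item.length : Int) = k - 1 then (PySem.Set.add st.1 (pvFz item), st.2)
        else if (item.length : Int) = k then (st.1, PySem.Set.add st.2 (pvFz item))
        else st)
      st).1, ∃ l, x = pvFz l := by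
  induction items generalizing st with
  | nil => exact h
  | cons a itms ih =>
    simp only [List.foldl_cons]
    split_ifs with h1 h2
    · exact ih _ (fun x hx => by
        rcases (PySem.Set.mem_add _ _ _).mp hx with hx | rfl
        · exact h x hx
        · exact ⟨a, rfl⟩)
    · exact ih _ h
    · exact ih _ h

theorem toDelete_eq (P Q : List (List Int)) :
    Q.foldl (fun acc q =>
        P.foldl (fun acc2 p => if PySem.Set.issuperset q p then acc2 ++ [p] else acc2) acc) []
      = Q.flatMap (fun q => P.filter (fun p => PySem.Set.issuperset q p)) := by
  have h1 : ∀ (q : List Int) (acc : List (List Int)),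
      P.foldl (fun acc2 p => if PySem.Set.issuperset q p then acc2 ++ [p] else acc2) acc
        = acc ++ P.filter (fun p => PySem.Set.issuperset q p) := fun q acc =>
    PySem.List.foldl_append_if_eq_filter _ _ _
  calc Q.foldl (fun acc q =>
        P.foldl (fun acc2 p => if PySem.Set.issuperset q p then acc2 ++ [p] else acc2) acc) []
      = Q.foldl (fun acc q => acc ++ P.filter (fun p => PySem.Set.issuperset q p)) [] := by
        congr 1; funext acc q; exact h1 q acc
    _ = Q.flatMap (fun q => P.filter (fun p => PySem.Set.issuperset q p)) := by
        rw [PySem.List.foldl_append_eq_flatMap]; rfl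

theorem key_iff (P Q : List (List Int)) (hP : ∀ p ∈ P, ∃ l, p = pvFz l) (item : List Int) :
    (∃ d, (∃ q ∈ Q, d ∈ P ∧ PySem.Set.issuperset q d = true) ∧ (∀ x, x ∈ item ↔ x ∈ d))
      ↔ (pvFz item ∈ P ∧
          (pvFz item).foldl (fun c e => PySem.Set.inter c
            ((Q.foldl (fun d q => q.foldl
                (fun d e => d.insert e (PySem.Set.add (d.getD e []) q)) d)
              PySem.Dict.empty).getD e [])) Q ≠ []) := by
  constructor
  · rintro ⟨d, ⟨q, hq, hdP, hsup⟩, hext⟩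
    have hd : pvFz item = d := by
      obtain ⟨l, rfl⟩ := hP d hdP
      rw [← pvFz_idem l]
      exact pvFz_eq_of_ext item (pvFz l) hext
    refine ⟨hd ▸ hdP, ?_⟩
    apply List.ne_nil_of_mem (a := q)
    rw [cands_mem]
    refine ⟨hq, fun e he => ?_⟩
    rw [index_mem]
    right
    exact ⟨q, hq, rfl, (PySem.Set.issuperset_iff _ _).mp hsup e (hd ▸ he)⟩
  · rintro ⟨hmem, hne⟩
    obtain ⟨q, hqc⟩ := List.exists_mem_of_ne_nil _ hne
    rw [cands_mem] at hqc
    obtain ⟨hqQ, hall⟩ := hqc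
    have hsup : PySem.Set.issuperset q (pvFz item) = true := by
      rw [PySem.Set.issuperset_iff]
      intro x hx
      have := hall x hx
      rw [index_mem] at this
      rcases this with h | ⟨q0, _, rfl, h2⟩
      · simp at h
      · exact h2
    exact ⟨pvFz item, ⟨q, hqQ, hmem, hsup⟩, fun x => (mem_pvFz x item).symm⟩

-- ===== VERDICT (by name: the statement is the Claim_ definition above) =====
theorem trimToSkyline_spec : Claim_equal_trimToSkyline := by
  intro items k _
  unfold Spec_trimToSkyline trimToSkyline trimToSkyline_alt
  simp only []
  have hP := state_canonical k items ([], []) (by simp)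
  generalize hst : items.foldl
      (fun (st : PySem.Set (List Int) × PySem.Set (List Int)) item =>
        if (item.length : Int) = k - 1 then (PySem.Set.add st.1 (pvFz item), st.2)
        else if (item.length : Int) = k then (st.1, PySem.Set.add st.2 (pvFz item))
        else st)
      ([], []) = st at hP ⊢
  obtain ⟨P, Q⟩ := st
  simp only [toDelete_eq]
  have hflag : ∀ (item : List Int),
      (Q.flatMap (fun q => P.filter (fun p => PySem.Set.issuperset q p))).foldl
        (fun f d => if PySem.Set.equal (PySem.Set.ofList item) (PySem.Set.ofList d) then false else f)
        true
      = !(Q.flatMap (fun q => P.filter (fun p => PySem.Set.issuperset q p))).any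
          (fun d => PySem.Set.equal (PySem.Set.ofList item) (PySem.Set.ofList d)) := by
    intro item; rw [flag_foldl]; simp
  calc items.foldl
        (fun fin item =>
          if (Q.flatMap (fun q => P.filter (fun p => PySem.Set.issuperset q p))).foldl
              (fun f d => if PySem.Set.equal (PySem.Set.ofList item) (PySem.Set.ofList d) then false else f)
              true
          then fin ++ [item] else fin) []
      = items.filter (fun item =>
          !(Q.flatMap (fun q => P.filter (fun p => PySem.Set.issuperset q p))).any
            (fun d => PySem.Set.equal (PySem.Set.ofList item) (PySem.Set.ofList d))) := by
        rw [show (fun (fin : List (List Int)) (item : List Int) =>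
            if (Q.flatMap (fun q => P.filter (fun p => PySem.Set.issuperset q p))).foldl
                (fun f d => if PySem.Set.equal (PySem.Set.ofList item) (PySem.Set.ofList d) then false else f)
                true
            then fin ++ [item] else fin)
          = (fun fin item =>
            if !(Q.flatMap (fun q => P.filter (fun p => PySem.Set.issuperset q p))).any
                (fun d => PySem.Set.equal (PySem.Set.ofList item) (PySem.Set.ofList d))
            then fin ++ [item] else fin) from funext fun fin => funext fun item => by rw [hflag]]
        exact PySem.List.foldl_append_if_eq_filter _ _ _
    _ = items.filter (fun item =>
          !(PySem.Set.contains (P.foldl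
            (fun del p =>
              if (p.foldl (fun c e => PySem.Set.inter c
                  ((Q.foldl (fun d q => q.foldl
                      (fun d e => d.insert e (PySem.Set.add (d.getD e []) q)) d)
                    PySem.Dict.empty).getD e [])) Q).isEmpty
              then del else PySem.Set.add del p) [])
            (pvFz item))) := by
        apply List.filter_congr
        intro item _
        congr 1
        rw [Bool.eq_iff_iff, List.any_eq_true, PySem.Set.contains_iff, deleted_mem]
        simp only [List.mem_flatMap, List.mem_filter, List.mem_nil_iff, false_or]
        rw [← key_iff P Q hP item]
        constructor
        · rintro ⟨d, ⟨q, hq, hd⟩, heq⟩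
          exact ⟨d, ⟨q, hq, hd.1, hd.2⟩,
            fun x => by
              have := (PySem.Set.equal_iff _ _).mp heq x
              rwa [PySem.Set.mem_ofList, PySem.Set.mem_ofList] at this⟩
        · rintro ⟨d, ⟨q, hq, hd1, hd2⟩, hext⟩
          refine ⟨d, ⟨q, hq, hd1, hd2⟩, ?_⟩
          rw [PySem.Set.equal_iff]
          intro x
          rw [PySem.Set.mem_ofList, PySem.Set.mem_ofList]
          exact hext x
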